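-- pv_equiv track=rewrite | github.com/noomesk/genome-cleaner | src/parser.py | _is_fasta_format
-- ===== SOURCE A (Python) =====
-- def _is_fasta_format(file_content: str) -> bool:
--     """Check if the file content is in FASTA format.
--
--     Args:
--         file_content (str): Raw file content
--
--     Returns:
--         bool: True if file appears to be FASTA format
--     """
--     lines = file_content.strip().split('\n')
--     if not lines:
--         return False
--
--     # FASTA files start with '>' and have sequences on subsequent lines
--     for i, line in enumerate(lines[:10]):  # Check first 10 lines
--         line = line.strip()
--         if not line:
--             continue
--         if line.startswith('>'):
--             return True
--         # If we find sequence lines before any header, it's not FASTA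
--         if i > 0 and not line.startswith('>'):
--             return False
--
--     return False
-- ===== SOURCE B (Python) =====
-- def _is_fasta_format(file_content: str) -> bool:
--     """Check if the file content is in FASTA format (same contract as A)."""
--     non_empty = [l.strip() for l in file_content.strip().split('\n')[:10] if l.strip()]
--     return any(l.startswith('>') for l in non_empty[:2])
-- ===== Notes on version B (the rewrite author's own statement) =====
-- stated objective: simpler
-- what changed: Replaces A's stateful enumerate loop with index-based early returns by a filter-then-slice decomposition: strip and keep the non-empty lines among the first 10, then test only the first two of them for the FASTA header prefix.
import Mathlib
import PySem

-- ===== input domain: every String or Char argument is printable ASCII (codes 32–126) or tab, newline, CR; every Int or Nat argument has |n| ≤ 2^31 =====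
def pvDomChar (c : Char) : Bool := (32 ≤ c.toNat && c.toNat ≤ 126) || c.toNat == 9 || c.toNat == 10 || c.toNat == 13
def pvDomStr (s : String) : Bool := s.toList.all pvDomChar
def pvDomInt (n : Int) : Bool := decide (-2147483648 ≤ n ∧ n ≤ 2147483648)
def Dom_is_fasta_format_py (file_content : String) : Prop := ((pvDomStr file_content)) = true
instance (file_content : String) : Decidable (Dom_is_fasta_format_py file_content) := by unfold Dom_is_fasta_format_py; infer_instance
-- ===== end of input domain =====

-- B replaces A's stateful index-based early-return scan by a filter-then-slice decomposition:
-- collect the stripped non-empty lines of the first 10 and test only the first two for the FASTA header prefix (objective: simpler).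

-- ===== PORT A =====
-- the for-loop of A over enumerate(lines[:10]) as structural recursion over the enumerated list
def fastaLoop : List (Int × List Char) → Bool
  | [] => false
  | (i, line0) :: rest =>
    -- 'line = line.strip()' inlined at each use
    if (PySem.Chars.strip line0).isEmpty then fastaLoop rest
    else if PySem.Chars.startswith (PySem.Chars.strip line0) ['>'] then true
    else if decide (0 < i) && !PySem.Chars.startswith (PySem.Chars.strip line0) ['>'] then false
    else fastaLoop rest

def is_fasta_format_py (file_content : String) : Bool :=
  let lines := PySem.Chars.splitOn (PySem.Chars.strip file_content.toList) ['\n']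
  if lines.isEmpty then false
  else fastaLoop (PySem.List.enumerate (PySem.List.slice lines none (some 10)))

-- ===== PORT B =====
def is_fasta_format_py_alt (file_content : String) : Bool :=
  let non_empty := ((PySem.List.slice (PySem.Chars.splitOn (PySem.Chars.strip file_content.toList) ['\n']) none (some 10)).map
      PySem.Chars.strip).filter (fun l => !l.isEmpty)
  (PySem.List.slice non_empty none (some 2)).any (fun l => PySem.Chars.startswith l ['>'])

-- ===== PRECONDITION & SPEC =====
def Spec_is_fasta_format_py (file_content : String) (out : Bool) : Prop := out = is_fasta_format_py_alt file_content
instance (file_content : String) (out : Bool) : Decidable (Spec_is_fasta_format_py file_content out) := by unfold Spec_is_fasta_format_py; infer_instance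

-- ===== CLAIM (what is proved, stated in full; the proofs are below) =====
def Claim_equal_is_fasta_format_py : Prop := ∀ (file_content : String), Dom_is_fasta_format_py file_content → Spec_is_fasta_format_py file_content (is_fasta_format_py file_content)

-- ===== LEMMAS AND PROOFS =====

-- the accumulator of splitOn.go survives (reversed) at the front of the result
lemma go_acc (sep : List Char) (fuel : Nat) (l cur : List Char) (acc : List (List Char)) :
    ∃ pre, pre ≠ [] ∧ PySem.Chars.splitOn.go sep fuel l cur acc = (pre ++ acc).reverse := by
  induction fuel generalizing l cur acc with
  | zero => exact ⟨[cur.reverse ++ l], by simp, by simp [PySem.Chars.splitOn.go]⟩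
  | succ fuel ih =>
    cases l with
    | nil => exact ⟨[cur.reverse], by simp, by simp [PySem.Chars.splitOn.go]⟩
    | cons c rest =>
      by_cases hp : sep.isPrefixOf (c :: rest) = true
      · obtain ⟨pre, hne, heq⟩ := ih (List.drop sep.length (c :: rest)) [] (cur.reverse :: acc)
        exact ⟨pre ++ [cur.reverse], by simp, by simp [PySem.Chars.splitOn.go, hp, heq]⟩
      · obtain ⟨pre, hne, heq⟩ := ih rest (c :: cur) acc
        exact ⟨pre, hne, by simp [PySem.Chars.splitOn.go, hp, heq]⟩

-- the first chunk produced by splitOn.go on a one-character separator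
lemma go_head (fuel : Nat) (l cur : List Char) (h : l.length ≤ fuel) :
    (PySem.Chars.splitOn.go ['\n'] fuel l cur []).head? =
      some (cur.reverse ++ l.takeWhile (fun c => c != '\n')) := by
  induction fuel generalizing l cur with
  | zero =>
    have : l = [] := List.eq_nil_of_length_eq_zero (Nat.le_zero.mp h)
    subst this
    simp [PySem.Chars.splitOn.go]
  | succ fuel ih =>
    cases l with
    | nil => simp [PySem.Chars.splitOn.go]
    | cons c rest =>
      by_cases hc : c = '\n'
      · subst hc
        have hp : List.isPrefixOf ['\n'] ('\n' :: rest) = true := by simp [List.isPrefixOf]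
        obtain ⟨pre, hne, heq⟩ := go_acc ['\n'] fuel (List.drop 1 ('\n' :: rest)) [] [cur.reverse]
        simp only [PySem.Chars.splitOn.go, hp, if_pos]
        rw [show (['\n'] : List Char).length = 1 from rfl, heq]
        simp [List.takeWhile]
      · have hp : List.isPrefixOf ['\n'] (c :: rest) = false := by
          simp [List.isPrefixOf]
          exact fun h' => (hc h'.symm).elim
        have := ih rest (c :: cur) (by simpa using Nat.le_of_succ_le_succ h)
        simp only [PySem.Chars.splitOn.go, hp]
        simp only [Bool.false_eq_true, if_false]
        rw [this]
        have hb : (c != '\n') = true := by simp [hc]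
        simp [hb]

lemma splitOn_head (cs : List Char) :
    (PySem.Chars.splitOn cs ['\n']).head? = some (cs.takeWhile (fun c => c != '\n')) := by
  unfold PySem.Chars.splitOn
  simpa using go_head (cs.length + 1) cs [] (by omega)

-- rstrip keeps a non-space head
lemma rstrip_cons (c : Char) (cs : List Char) (hc : PySem.Chars.isspace c = false) :
    ∃ t, PySem.Chars.rstrip (c :: cs) = c :: t := by
  unfold PySem.Chars.rstrip
  have hrev : (c :: cs).reverse = cs.reverse ++ [c] := by simp
  set dw := List.dropWhile PySem.Chars.isspace (c :: cs).reverse with hdw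
  have hne : dw ≠ [] := by
    rw [hdw]
    intro hnil
    have := List.dropWhile_eq_nil_iff.mp hnil c (by simp)
    rw [hc] at this; exact Bool.false_ne_true this
  have hsuf : dw <:+ (c :: cs).reverse := List.dropWhile_suffix _
  obtain ⟨pre, hpre⟩ := hsuf
  have hlast : dw.getLast? = some c := by
    have h1 : ((c :: cs).reverse).getLast? = some c := by
      rw [hrev]; exact List.getLast?_concat
    rw [← hpre, List.getLast?_append] at h1
    cases hg : dw.getLast? with
    | none => exact absurd hg (by simpa using List.getLast?_eq_none_iff.not.mpr (by simpa using hne))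
    | some x => rw [hg] at h1; simp at h1; simp [h1]
  have hhead : dw.reverse.head? = some c := by rw [List.head?_reverse]; exact hlast
  cases hrv : dw.reverse with
  | nil => rw [hrv] at hhead; simp at hhead
  | cons x t =>
    rw [hrv] at hhead
    simp at hhead
    exact ⟨t, by rw [← hhead]⟩

-- strip keeps a non-space head
lemma strip_cons (c : Char) (cs : List Char) (hc : PySem.Chars.isspace c = false) :
    ∃ t, PySem.Chars.strip (c :: cs) = c :: t := by
  unfold PySem.Chars.strip PySem.Chars.lstrip
  rw [List.dropWhile_cons_of_neg (by simp [hc])]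
  exact rstrip_cons c cs hc

-- the result of strip is empty or starts with a non-space character
lemma strip_cases (s : List Char) :
    PySem.Chars.strip s = [] ∨
      ∃ c t, PySem.Chars.strip s = c :: t ∧ PySem.Chars.isspace c = false := by
  unfold PySem.Chars.strip
  cases hls : PySem.Chars.lstrip s with
  | nil => left; simp [PySem.Chars.rstrip]
  | cons c t =>
    have hc : PySem.Chars.isspace c = false := by
      unfold PySem.Chars.lstrip at hls
      have := List.head?_dropWhile_not PySem.Chars.isspace s
      rw [hls] at this; simpa using this
    obtain ⟨t', ht'⟩ := rstrip_cons c t hc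
    right; exact ⟨c, t', ht', hc⟩

-- A's loop over indices ≥ 1 decides by the first non-empty stripped line
lemma loop_pos (rest : List (List Char)) (s : Int) (hs : 1 ≤ s) :
    fastaLoop (PySem.List.enumerate rest s) =
      (((rest.map PySem.Chars.strip).filter (fun l => !l.isEmpty)).take 1).any
        (fun l => PySem.Chars.startswith l ['>']) := by
  induction rest generalizing s with
  | nil => simp [PySem.List.enumerate, fastaLoop]
  | cons r rs ih =>
    rw [PySem.List.enumerate_cons]
    by_cases hemp : (PySem.Chars.strip r).isEmpty = true
    · simp only [fastaLoop, hemp, if_pos]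
      rw [ih (s + 1) (by omega)]
      simp [hemp]
    · by_cases hst : PySem.Chars.startswith (PySem.Chars.strip r) ['>'] = true
      · simp [fastaLoop, hemp, hst]
      · have h0 : decide (0 < s) = true := by simp; omega
        simp [fastaLoop, hemp, hst, h0]

-- ===== VERDICT (by name: the statement is the Claim_ definition above) =====
theorem is_fasta_format_py_spec : Claim_equal_is_fasta_format_py := by
  intro fc _
  unfold Spec_is_fasta_format_py is_fasta_format_py is_fasta_format_py_alt
  dsimp only
  rcases strip_cases fc.toList with hnil | ⟨c, t, hct, hc⟩
  · rw [hnil]; rfl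
  · rw [hct]
    have hcn : c ≠ '\n' := by
      intro h; subst h; exact absurd hc (by decide)
    have hhead2 : (PySem.Chars.splitOn (c :: t) ['\n']).head? =
        some (c :: t.takeWhile (fun x => x != '\n')) := by
      rw [splitOn_head]
      have hb : (c != '\n') = true := by simp [hcn]
      simp [hb]
    obtain ⟨L, hL⟩ : ∃ L, PySem.Chars.splitOn (c :: t) ['\n'] =
        (c :: t.takeWhile (fun x => x != '\n')) :: L := by
      cases h : PySem.Chars.splitOn (c :: t) ['\n'] with
      | nil => rw [h] at hhead2; simp at hhead2
      | cons a L =>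
        rw [h] at hhead2; simp at hhead2
        exact ⟨L, by rw [hhead2]⟩
    rw [hL]
    obtain ⟨t', ht'⟩ := strip_cons c (t.takeWhile (fun x => x != '\n')) hc
    rw [PySem.List.slice_to ((c :: t.takeWhile (fun x => x != '\n')) :: L) (by norm_num)]
    have h10 : List.take (Int.toNat 10) ((c :: t.takeWhile (fun x => x != '\n')) :: L)
        = (c :: t.takeWhile (fun x => x != '\n')) :: List.take 9 L := by
      rw [show Int.toNat 10 = 9 + 1 from rfl, List.take_succ_cons]
    rw [h10, List.map_cons, List.filter_cons_of_pos (by simp [ht']), ht']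
    rw [PySem.List.slice_to _ (by norm_num : (0:Int) ≤ 2)]
    have h2 : List.take (Int.toNat 2)
          ((c :: t') :: List.filter (fun l => !l.isEmpty) (List.map PySem.Chars.strip (List.take 9 L)))
        = (c :: t') :: List.take 1 (List.filter (fun l => !l.isEmpty) (List.map PySem.Chars.strip (List.take 9 L))) := by
      rw [show Int.toNat 2 = 1 + 1 from rfl, List.take_succ_cons]
    rw [h2, PySem.List.enumerate_cons]
    by_cases hP : PySem.Chars.startswith (c :: t') ['>'] = true
    · simp [fastaLoop, ht', hP]
    · have hPf : PySem.Chars.startswith (c :: t') ['>'] = false := by simpa using hP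
      simp only [fastaLoop, ht', List.isEmpty_cons, Bool.false_eq_true, if_false, hPf, Bool.not_false, Bool.and_true]
      rw [show (0 : Int) + 1 = 1 from rfl, loop_pos (L.take 9) 1 (by norm_num)]
      simp [hPf, List.map_take]
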